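-- pv_equiv track=rewrite | github.com/ShabaniLab/TQC-Braiding-Nanowire | particle-movement.py | initiate_nanowire
-- ===== SOURCE A (Python) =====
-- def initiate_nanowire(nanowire,positions):
--     for i in range(len(positions)):
--         pos = positions[i]
--         for branch in nanowire:
--             for tup in branch:
--                 if list(tup.keys())[0]==pos:
--                     tup[pos] = i
--     return nanowire
-- ===== SOURCE B (Python) =====
-- def initiate_nanowire(nanowire, positions):
--     idx = {pos: i for i, pos in enumerate(positions)}
--     for branch in nanowire:
--         for tup in branch:
--             if tup:
--                 k = next(iter(tup))
--                 if k in idx: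
--                     tup[k] = idx[k]
--     return nanowire
-- ===== Notes on version B (the rewrite author's own statement) =====
-- stated objective: faster
-- what changed: B builds a reverse index dict from positions once and makes a single pass over the nanowire structure, instead of A's rescanning every node for every position.
import Mathlib
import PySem

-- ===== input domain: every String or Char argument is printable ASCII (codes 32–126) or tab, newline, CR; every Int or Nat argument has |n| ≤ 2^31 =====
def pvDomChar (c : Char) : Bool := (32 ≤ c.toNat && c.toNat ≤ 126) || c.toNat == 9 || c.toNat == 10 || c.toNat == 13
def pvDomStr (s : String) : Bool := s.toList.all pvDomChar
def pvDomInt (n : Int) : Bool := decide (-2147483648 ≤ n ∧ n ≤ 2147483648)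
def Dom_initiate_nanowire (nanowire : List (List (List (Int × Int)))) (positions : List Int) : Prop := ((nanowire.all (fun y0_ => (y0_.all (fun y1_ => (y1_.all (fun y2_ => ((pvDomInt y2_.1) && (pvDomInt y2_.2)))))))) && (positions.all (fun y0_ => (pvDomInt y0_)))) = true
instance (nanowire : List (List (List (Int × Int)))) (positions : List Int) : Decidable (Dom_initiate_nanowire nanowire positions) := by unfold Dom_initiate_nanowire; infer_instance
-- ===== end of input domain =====

-- B builds a reverse-index dict over positions once and walks the nanowire a single time,
-- instead of A's rescanning every node for every position. Both Pythons mutate the node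
-- dicts of `nanowire` in place identically; the equivalence proved here is about the returned value.

-- ===== PORT A =====
-- one inner-loop body: `if list(tup.keys())[0]==pos: tup[pos] = i`
def pvUpdA (i pos : Int) (tup : List (Int × Int)) : List (Int × Int) :=
  if PySem.List.pyGet? (tup.map Prod.fst) 0 = some pos then
    ((PySem.Dict.mk tup).insert pos i).items
  else tup

def initiate_nanowire (nanowire : List (List (List (Int × Int)))) (positions : List Int) : List (List (List (Int × Int))) :=
  (PySem.List.pyRange 0 positions.length 1).foldl
    (fun nw i =>
      let pos := PySem.List.pyGetD positions i 0
      nw.map (fun branch => branch.map (fun tup => pvUpdA i pos tup)))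
    nanowire

-- ===== PORT B =====
-- idx = {pos: i for i, pos in enumerate(positions)}  (a later duplicate position overwrites the earlier index)
def pvIdx (positions : List Int) : PySem.Dict Int Int :=
  (PySem.List.enumerate positions).foldl (fun d p => d.insert p.2 p.1) PySem.Dict.empty

-- `if tup: k = next(iter(tup)); if k in idx: tup[k] = idx[k]`
def pvUpdB (idx : PySem.Dict Int Int) (tup : List (Int × Int)) : List (Int × Int) :=
  match tup with
  | [] => tup
  | (k, _) :: _ =>
      match idx.get? k with
      | some v => ((PySem.Dict.mk tup).insert k v).items
      | none => tup

def initiate_nanowire_alt (nanowire : List (List (List (Int × Int)))) (positions : List Int) : List (List (List (Int × Int))) :=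
  let idx := pvIdx positions
  nanowire.map (fun branch => branch.map (fun tup => pvUpdB idx tup))

-- ===== PRECONDITION & SPEC =====
-- Pre_ excludes exactly the inputs where Python A raises IndexError: a nonempty positions
-- list together with some empty node dict (list(tup.keys())[0] fails there).
def Pre_initiate_nanowire (nanowire : List (List (List (Int × Int)))) (positions : List Int) : Prop :=
  positions = [] ∨ (nanowire.all (fun branch => branch.all (fun tup => !tup.isEmpty))) = true
instance (nanowire : List (List (List (Int × Int)))) (positions : List Int) : Decidable (Pre_initiate_nanowire nanowire positions) := by unfold Pre_initiate_nanowire; infer_instance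

def pvWitness_initiate_nanowire : (List (List (List (Int × Int)))) × List Int :=
  ([[[(3, 9), (5, 5)], [(7, 0)]], [[(3, 1)]]], [7, 3, 7, 3])

def Spec_initiate_nanowire (nanowire : List (List (List (Int × Int)))) (positions : List Int) (out : List (List (List (Int × Int)))) : Prop := out = initiate_nanowire_alt nanowire positions
instance (nanowire : List (List (List (Int × Int)))) (positions : List Int) (out : List (List (List (Int × Int)))) : Decidable (Spec_initiate_nanowire nanowire positions out) := by unfold Spec_initiate_nanowire; infer_instance

-- ===== CLAIM (what is proved, stated in full; the proofs are below) =====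
def Claim_equal_initiate_nanowire : Prop := ∀ (nanowire : List (List (List (Int × Int)))) (positions : List Int), Dom_initiate_nanowire nanowire positions → Pre_initiate_nanowire nanowire positions → Spec_initiate_nanowire nanowire positions (initiate_nanowire nanowire positions)

-- ===== LEMMAS AND PROOFS =====

-- last i such that (i, pos) ∈ L with pos = k (proof-side characterisation of both programs)
def pvLastVal (L : List (Int × Int)) (k : Int) : Option Int :=
  match L with
  | [] => none
  | (i, pos) :: L' =>
      match pvLastVal L' k with
      | some v => some v
      | none => if pos = k then some i else none

-- A's index loop over range(len(positions)) with positions[i] is the fold over enumerate(positions)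
theorem pvFoldlRangeEnum {γ : Type} (g : γ → Int → Int → γ) :
    ∀ (ps pre : List Int) (init : γ),
      (PySem.List.pyRange (pre.length : Int) ((pre.length : Int) + ps.length) 1).foldl
          (fun acc i => g acc i (PySem.List.pyGetD (pre ++ ps) i 0)) init
        = (PySem.List.enumerate ps (pre.length : Int)).foldl (fun acc p => g acc p.1 p.2) init := by
  intro ps
  induction ps with
  | nil =>
      intro pre init
      rw [PySem.List.pyRange_one_eq_nil (by simp)]
      simp [PySem.List.enumerate_nil]
  | cons x ps ih =>
      intro pre init
      have hlt : (pre.length : Int) < (pre.length : Int) + ((x :: ps).length : Int) := by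
        have : (0:Int) < ((x :: ps).length : Int) := by exact_mod_cast Nat.succ_pos ps.length
        omega
      rw [PySem.List.pyRange_one_cons hlt]
      rw [List.foldl_cons]
      have hget : PySem.List.pyGetD (pre ++ x :: ps) (pre.length : Int) 0 = x := by
        rw [PySem.List.pyGetD_natCast]
        simp
      rw [hget]
      have h2 := ih (pre ++ [x]) (g init (pre.length : Int) x)
      simp only [List.length_append, List.length_cons, List.length_nil, List.append_assoc,
        List.singleton_append, Nat.cast_add, Nat.cast_one] at h2 ⊢
      rw [PySem.List.enumerate_cons]
      rw [List.foldl_cons]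
      convert h2 using 3 ; push_cast ; ring

-- what A's two inserted items look like when the first key is overwritten
theorem pvHeadKey_insert (k i : Int) (w : Int) (rest : List (Int × Int)) :
    (((PySem.Dict.mk ((k, w) :: rest)).insert k i).items) =
      (k, i) :: rest.map (fun p => if p.1 == k then (k, i) else p) := by
  rw [PySem.Dict.items_insert_of_contains]
  · simp
  · simp [PySem.Dict.contains]

-- folding A's update over any pair list on a tup whose first key is k
theorem pvStepA_eq (k : Int) :
    ∀ (L tup : List (Int × Int)), (tup.map Prod.fst)[0]? = some k →
      L.foldl (fun t p => pvUpdA p.1 p.2 t) tup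
        = match pvLastVal L k with
          | some v => ((PySem.Dict.mk tup).insert k v).items
          | none => tup := by
  intro L
  induction L with
  | nil => intro tup h; simp [pvLastVal]
  | cons p L ih =>
      intro tup h
      obtain ⟨i, pos⟩ := p
      obtain ⟨⟨k0, w⟩, rest, rfl⟩ : ∃ (a : Int × Int) (rest : List (Int × Int)), tup = a :: rest := by
        cases tup with
        | nil => simp at h
        | cons a rest => exact ⟨a, rest, rfl⟩
      have hk0 : k0 = k := by simpa using h
      subst hk0
      by_cases hpos : pos = k0
      · rw [hpos]
        rw [List.foldl_cons]
        have hupd : pvUpdA i k0 ((k0, w) :: rest)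
            = (k0, i) :: rest.map (fun p => if p.1 == k0 then (k0, i) else p) := by
          rw [pvUpdA]
          rw [if_pos (by simp [PySem.List.pyGet?, PySem.List.pyIdx?])]
          exact pvHeadKey_insert k0 i w rest
        rw [hupd]
        rw [ih _ (by simp)]
        have hmk : (PySem.Dict.mk ((k0, i) :: rest.map (fun p => if p.1 == k0 then (k0, i) else p)))
            = (PySem.Dict.mk ((k0, w) :: rest)).insert k0 i := by
          apply PySem.Dict.ext
          simp [pvHeadKey_insert]
        rw [hmk]
        simp only [pvLastVal]
        cases hl : pvLastVal L k0 with
        | some v => simp [PySem.Dict.insert_insert_self]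
        | none => simp [pvHeadKey_insert]
      · rw [List.foldl_cons]
        have hupd : pvUpdA i pos ((k0, w) :: rest) = (k0, w) :: rest := by
          rw [pvUpdA, if_neg]
          simp [PySem.List.pyGet?, PySem.List.pyIdx?]
          omega
        rw [hupd, ih _ (by simp)]
        simp only [pvLastVal]
        cases hl : pvLastVal L k0 with
        | some v => simp
        | none => simp [hpos]

-- looking up the reverse-index dict yields the last matching index
theorem pvIdx_get (k : Int) :
    ∀ (L : List (Int × Int)) (d : PySem.Dict Int Int),
      (L.foldl (fun d p => d.insert p.2 p.1) d).get? k
        = match pvLastVal L k with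
          | some v => some v
          | none => d.get? k := by
  intro L
  induction L with
  | nil => intro d; simp [pvLastVal]
  | cons p L ih =>
      intro d
      obtain ⟨i, pos⟩ := p
      rw [List.foldl_cons, ih]
      simp only [pvLastVal]
      cases hl : pvLastVal L k with
      | some v => simp
      | none =>
          simp only
          rw [PySem.Dict.get?_insert]
          by_cases hpos : pos = k
          · subst hpos; simp
          · simp [hpos, Ne.symm hpos]

-- swap a fold of maps into a map of folds
theorem pvFoldlMap {α β : Type} (f : α → β → β) :
    ∀ (L : List α) (xs : List β),
      L.foldl (fun acc a => acc.map (f a)) xs = xs.map (fun x => L.foldl (fun t a => f a t) x) := by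
  intro L
  induction L with
  | nil => intro xs; simp
  | cons a L ih => intro xs; simp [List.foldl_cons, ih, List.map_map, Function.comp]

-- A's fold leaves an empty node unchanged
theorem pvStepA_nil (L : List (Int × Int)) :
    L.foldl (fun t p => pvUpdA p.1 p.2 t) [] = [] := by
  induction L with
  | nil => rfl
  | cons p L ih => simpa [pvUpdA, PySem.List.pyGet?, PySem.List.pyIdx?] using ih

-- per-node agreement of the two programs
theorem pvTup_eq (ps : List Int) (tup : List (Int × Int)) :
    (PySem.List.enumerate ps 0).foldl (fun t p => pvUpdA p.1 p.2 t) tup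
      = pvUpdB (pvIdx ps) tup := by
  cases tup with
  | nil => simpa [pvUpdB] using pvStepA_nil (PySem.List.enumerate ps 0)
  | cons a rest =>
      obtain ⟨k, w⟩ := a
      rw [pvStepA_eq k (PySem.List.enumerate ps 0) ((k, w) :: rest) (by simp)]
      have hidx : (pvIdx ps).get? k
          = match pvLastVal (PySem.List.enumerate ps 0) k with
            | some v => some v
            | none => none := by
        rw [pvIdx, pvIdx_get k (PySem.List.enumerate ps 0) PySem.Dict.empty]
        cases pvLastVal (PySem.List.enumerate ps 0) k with
        | some v => rfl
        | none => simp
      cases hl : pvLastVal (PySem.List.enumerate ps 0) k with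
      | some v => simp [pvUpdB, hidx, hl]
      | none => simp [pvUpdB, hidx, hl]

-- ===== VERDICT (by name: the statement is the Claim_ definition above) =====
theorem initiate_nanowire_spec : Claim_equal_initiate_nanowire := by
  intro nw ps _ _
  show initiate_nanowire nw ps = initiate_nanowire_alt nw ps
  have hb := pvFoldlRangeEnum
      (fun acc i pos => acc.map (fun branch => branch.map (fun tup => pvUpdA i pos tup))) ps [] nw
  simp only [List.length_nil, Nat.cast_zero, List.nil_append, zero_add] at hb
  have hA : initiate_nanowire nw ps
      = (PySem.List.enumerate ps 0).foldl
          (fun acc p => acc.map (fun branch => branch.map (fun tup => pvUpdA p.1 p.2 tup))) nw := by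
    rw [initiate_nanowire]
    exact hb
  rw [hA, initiate_nanowire_alt]
  simp only [pvFoldlMap]
  have : (fun tup => (PySem.List.enumerate ps 0).foldl (fun t p => pvUpdA p.1 p.2 t) tup)
      = (fun tup => pvUpdB (pvIdx ps) tup) := funext (pvTup_eq ps)
  rw [this]
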